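-- pv_equiv track=rewrite | github.com/vslyubimov/epam_python_hw | homework1/task02.py | check_fibonacci_version_1
-- ===== SOURCE A (Python) =====
-- from typing import Sequence
--
-- def generate_fibonacci(start_from):
--     a, b = 0, 1
--     while True:
--         if a >= start_from:
--             yield a
--         a, b = b, a + b
--
-- def check_fibonacci_version_1(data: Sequence[int]) -> bool:
--     """
--
--     :rtype: object
--     """
--     if data:
--         first_element = data[0]
--         for a, b in zip(data, generate_fibonacci(first_element)):
--             if a != b:
--                 return False
--         return True
--     return False
-- ===== SOURCE B (Python) =====
-- def check_fibonacci_version_1(data) -> bool: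
--     if not data:
--         return False
--     # advance the fib pair until a is the smallest fib term >= the first element
--     a, b = 0, 1
--     while a < data[0]:
--         a, b = b, a + b
--     if data[0] != a:
--         return False
--     if len(data) == 1:
--         return True
--     if data[1] != b:
--         return False
--     for i in range(2, len(data)):
--         if data[i] != data[i - 1] + data[i - 2]:
--             return False
--     return True
-- ===== Notes on version B (the rewrite author's own statement) =====
-- stated objective: alternative
-- what changed: Instead of zipping the data against a regenerated Fibonacci generator, B anchors only the first two expected terms by advancing one fib pair up to the first element and then verifies the Fibonacci recurrence (each element equals the sum of the two before it) locally on the data itself.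
import Mathlib
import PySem

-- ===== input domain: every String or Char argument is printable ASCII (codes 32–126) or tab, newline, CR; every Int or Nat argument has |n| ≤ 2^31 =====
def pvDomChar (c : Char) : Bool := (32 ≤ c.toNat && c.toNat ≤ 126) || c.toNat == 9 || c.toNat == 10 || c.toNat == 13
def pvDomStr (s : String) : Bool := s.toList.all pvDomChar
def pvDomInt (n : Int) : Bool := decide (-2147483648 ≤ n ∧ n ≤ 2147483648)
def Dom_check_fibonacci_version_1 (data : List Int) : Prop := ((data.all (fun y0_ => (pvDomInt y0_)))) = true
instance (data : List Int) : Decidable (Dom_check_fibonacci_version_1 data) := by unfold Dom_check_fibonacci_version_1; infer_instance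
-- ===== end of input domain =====

-- B anchors a fib pair at the first element and checks the Fibonacci recurrence locally on
-- the data instead of regenerating and zipping the full generator sequence; objective:
-- alternative decomposition, no speed claim.

-- ===== PORT A =====
-- the generator's advance loop: step (a,b) -> (b,a+b) until a >= start (fuel only makes it
-- total; on the stated domain the fuel is never exhausted — see fibAdvance_spec below)
def fibAdvance : Nat → Int → Int → Int → Int × Int
  | 0, _, a, b => (a, b)
  | n + 1, start, a, b => if a < start then fibAdvance n start b (a + b) else (a, b)

def pvFuel : Nat := 2 ^ 33

-- one `next(gen)`: advance until a >= start, yield a, state becomes (b, a+b)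
def genNext (start a b : Int) : Int × (Int × Int) :=
  let p := fibAdvance pvFuel start a b
  (p.1, (p.2, p.1 + p.2))

-- the `for a, b in zip(data, generate_fibonacci(first_element))` loop
def goA (start : Int) : List Int → Int → Int → Bool
  | [], _, _ => true
  | x :: xs, a, b =>
    let y := genNext start a b
    if x ≠ y.1 then false else goA start xs y.2.1 y.2.2

def check_fibonacci_version_1 (data : List Int) : Bool :=
  match data with
  | [] => false
  | d0 :: _ => goA d0 data 0 1

-- ===== PORT B =====
-- the recurrence-check loop of B, carrying the previous two elements
def goB : Int → Int → List Int → Bool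
  | _, _, [] => true
  | p, q, x :: xs => if x ≠ p + q then false else goB q x xs

def check_fibonacci_version_1_alt (data : List Int) : Bool :=
  match data with
  | [] => false
  | d0 :: rest =>
    let p := fibAdvance pvFuel d0 0 1
    if d0 ≠ p.1 then false
    else
      match rest with
      | [] => true
      | d1 :: rest2 => if d1 ≠ p.2 then false else goB d0 d1 rest2

-- ===== PRECONDITION & SPEC =====
def Spec_check_fibonacci_version_1 (data : List Int) (out : Bool) : Prop := out = check_fibonacci_version_1_alt data
instance (data : List Int) (out : Bool) : Decidable (Spec_check_fibonacci_version_1 data out) := by unfold Spec_check_fibonacci_version_1; infer_instance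

-- ===== CLAIM (what is proved, stated in full; the proofs are below) =====
def Claim_equal_check_fibonacci_version_1 : Prop := ∀ (data : List Int), Dom_check_fibonacci_version_1 data → Spec_check_fibonacci_version_1 data (check_fibonacci_version_1 data)

-- ===== LEMMAS AND PROOFS =====

-- if the head already satisfies a >= start, the advance loop is the identity (any fuel)
theorem fibAdvance_ge (n : Nat) (start a b : Int) (h : start ≤ a) :
    fibAdvance n start a b = (a, b) := by
  cases n with
  | zero => rfl
  | succ m => simp [fibAdvance]; omega

-- with fuel ≥ 2k and start ≤ a + k, the advance loop reaches a pair with start ≤ fst ≤ snd, 0 ≤ fst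
theorem fibAdvance_spec (k : Nat) : ∀ (n : Nat) (start a b : Int),
    0 ≤ a → 1 ≤ b → a ≤ b → start ≤ a + (k : Int) → 2 * k ≤ n →
    start ≤ (fibAdvance n start a b).1 ∧
    (fibAdvance n start a b).1 ≤ (fibAdvance n start a b).2 ∧
    0 ≤ (fibAdvance n start a b).1 := by
  induction k with
  | zero =>
    intro n start a b ha hb hab hk _
    simp at hk
    rw [fibAdvance_ge n start a b hk]
    exact ⟨hk, hab, ha⟩
  | succ k ih =>
    intro n start a b ha hb hab hk hn
    by_cases hlt : a < start
    · match n, hn with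
      | n' + 2, _ =>
        have h1 : fibAdvance (n' + 2) start a b = fibAdvance (n' + 1) start b (a + b) := by
          simp [fibAdvance, hlt]
        rw [h1]
        by_cases hlt2 : b < start
        · have h2 : fibAdvance (n' + 1) start b (a + b) = fibAdvance n' start (a + b) (b + (a + b)) := by
            simp [fibAdvance, hlt2]
          rw [h2]
          exact ih n' start (a + b) (b + (a + b)) (by omega) (by omega) (by omega)
            (by push_cast at hk ⊢; omega) (by omega)
        · rw [fibAdvance_ge _ _ _ _ (by omega)]
          refine ⟨by omega, by omega, by omega⟩
    · rw [fibAdvance_ge n start a b (by omega)]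
      exact ⟨by omega, hab, ha⟩

-- core correspondence: A's zip loop from a reached state equals B's local recurrence check
theorem goA_eq_goB (start : Int) : ∀ (xs : List Int) (p q : Int),
    start ≤ p → p ≤ q → 0 ≤ p →
    goA start xs (p + q) (q + (p + q)) = goB p q xs := by
  intro xs
  induction xs with
  | nil => intro p q _ _ _; rfl
  | cons x xs ih =>
    intro p q h1 h2 h3
    have hge : start ≤ p + q := by omega
    simp only [goA, goB, genNext, fibAdvance_ge pvFuel start (p + q) (q + (p + q)) hge]
    by_cases hx : x = p + q
    · subst hx
      simp only [ne_eq, not_true_eq_false, if_false]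
      exact ih q (p + q) (by omega) (by omega) (by omega)
    · simp [hx]

-- A's zip loop from the anchored state equals B's tail (second-element check + recurrence)
theorem goA_tail (start f0 f1 : Int) (rest : List Int)
    (h1 : start ≤ f0) (h2 : f0 ≤ f1) (h3 : 0 ≤ f0) :
    goA start rest f1 (f0 + f1) =
      (match rest with
       | [] => true
       | d1 :: rest2 => if d1 ≠ f1 then false else goB f0 d1 rest2) := by
  match rest with
  | [] => rfl
  | d1 :: rest2 =>
    simp only [goA, genNext, fibAdvance_ge pvFuel start f1 (f0 + f1) (by omega)]
    by_cases hd : d1 = f1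
    · subst hd
      simp only [ne_eq, not_true_eq_false, if_false]
      exact goA_eq_goB start rest2 f0 d1 h1 h2 h3
    · simp [hd]
theorem check_fibonacci_version_1_spec : Claim_equal_check_fibonacci_version_1 := by
  intro data hdom
  unfold Spec_check_fibonacci_version_1
  match data with
  | [] => rfl
  | d0 :: rest =>
    have hd0 : d0 ≤ 2147483648 := by
      unfold Dom_check_fibonacci_version_1 at hdom
      simp [pvDomInt] at hdom
      omega
    have hspec := fibAdvance_spec (2 ^ 31 + 1) pvFuel d0 0 1 (by omega) (by omega) (by omega)
      (by norm_num; omega) (by norm_num [pvFuel])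
    rcases hp : fibAdvance pvFuel d0 0 1 with ⟨f0, f1⟩
    rw [hp] at hspec
    obtain ⟨hs1, hs2, hs3⟩ := hspec
    show goA d0 (d0 :: rest) 0 1 = check_fibonacci_version_1_alt (d0 :: rest)
    unfold check_fibonacci_version_1_alt
    simp only [goA, genNext, hp]
    by_cases h0 : d0 = f0
    · simp only [ne_eq, h0, not_true_eq_false, if_false]
      exact goA_tail f0 f0 f1 rest (h0 ▸ hs1) hs2 hs3
    · simp [h0]
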